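-- pv_equiv track=rewrite | github.com/alexwu2021/practice | Python/python3/leetcode/Easy/CheckSortedArray.py | check_speed
-- ===== SOURCE A (Python) =====
-- from typing import List
--
-- def check_speed(nums: List[int]) -> bool:
--     if not nums or len(nums) <= 2:
--         return True
--
--     i = 0
--     count = 0
--     while i < len(nums):
--         if nums[i % len(nums)] < nums[(i - 1)]:
--             count += 1
--         i += 1
--     return count <= 1
-- ===== SOURCE B (Python) =====
-- from typing import List
--
-- def check_speed(nums: List[int]) -> bool:
--     if not nums or len(nums) <= 2:
--         return True
--     p = 0
--     for i in range(1, len(nums)):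
--         if nums[i] < nums[i - 1]:
--             p = i
--             break
--     r = nums[p:] + nums[:p]
--     return all(r[i] <= r[i + 1] for i in range(len(r) - 1))
-- ===== Notes on version B (the rewrite author's own statement) =====
-- stated objective: alternative
-- what changed: Instead of tallying circular descents in one wrap-around counting pass, B locates the first break point p, rebuilds the rotation nums[p:]+nums[:p], and checks that the rebuilt list is sorted by adjacent comparison.
import Mathlib
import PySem

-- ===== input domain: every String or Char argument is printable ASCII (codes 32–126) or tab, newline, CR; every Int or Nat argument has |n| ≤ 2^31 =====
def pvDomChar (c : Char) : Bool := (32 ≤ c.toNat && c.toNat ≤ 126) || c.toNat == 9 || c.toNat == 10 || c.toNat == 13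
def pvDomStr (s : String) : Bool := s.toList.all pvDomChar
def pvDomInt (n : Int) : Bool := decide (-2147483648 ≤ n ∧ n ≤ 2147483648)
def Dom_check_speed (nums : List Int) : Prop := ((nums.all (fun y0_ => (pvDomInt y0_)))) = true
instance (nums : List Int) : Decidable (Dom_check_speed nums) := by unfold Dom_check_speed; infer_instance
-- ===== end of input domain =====

-- B rebuilds the rotation at the first break point and checks it is sorted, instead of A's single wrap-around pass counting circular descents; objective: alternative decomposition (same asymptotic cost).


-- ===== PORT A =====
-- one pass over i = 0..n-1 counting circular descents nums[i % n] < nums[i-1] (i = 0 reads nums[-1], the last element)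
def check_speed (nums : List Int) : Bool :=
  if nums = [] ∨ nums.length ≤ 2 then true
  else
    let n : Int := nums.length
    let count : Int := (PySem.List.pyRange 0 n 1).foldl
      (fun c i => if PySem.List.pyGetD nums (PySem.Int.mod i n) 0 < PySem.List.pyGetD nums (i - 1) 0 then c + 1 else c) 0
    decide (count ≤ 1)

-- ===== PORT B =====
-- the 'for i in range(1, len(nums)): … break' scan for the first break point (p stays 0 when none is found)
def findBreak (nums : List Int) (i : Nat) : Nat :=
  if i < nums.length then
    if PySem.List.pyGetD nums (i : Int) 0 < PySem.List.pyGetD nums ((i : Int) - 1) 0 then i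
    else findBreak nums (i + 1)
  else 0
termination_by nums.length - i

def check_speed_alt (nums : List Int) : Bool :=
  if nums = [] ∨ nums.length ≤ 2 then true
  else
    let p : Nat := findBreak nums 1
    let r : List Int :=
      PySem.List.slice nums (some (p : Int)) none ++ PySem.List.slice nums none (some (p : Int))
    (PySem.List.pyRange 0 ((r.length : Int) - 1) 1).all
      (fun i => decide (PySem.List.pyGetD r i 0 ≤ PySem.List.pyGetD r (i + 1) 0))

-- ===== PRECONDITION & SPEC =====
def Spec_check_speed (nums : List Int) (out : Bool) : Prop := out = check_speed_alt nums
instance (nums : List Int) (out : Bool) : Decidable (Spec_check_speed nums out) := by unfold Spec_check_speed; infer_instance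

-- ===== CLAIM (what is proved, stated in full; the proofs are below) =====
def Claim_equal_check_speed : Prop := ∀ (nums : List Int), Dom_check_speed nums → Spec_check_speed nums (check_speed nums)

-- ===== LEMMAS AND PROOFS =====

-- descent at position j (j >= 1): nums[j] < nums[j-1], phrased totally with getD
def pvDB (nums : List Int) (j : Nat) : Bool := decide (nums.getD j 0 < nums.getD (j - 1) 0)

lemma countP_unique {l : List Nat} (hl : l.Nodup) {a : Nat} (ha : a ∈ l)
    {P : Nat → Bool} (hPa : P a = true) :
    (l.countP P ≤ 1 ↔ ∀ b ∈ l, b ≠ a → P b = false) := by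
  induction l with
  | nil => simp at ha
  | cons x t ih =>
    have hx : x ∉ t := (List.nodup_cons.1 hl).1
    have ht : t.Nodup := (List.nodup_cons.1 hl).2
    rw [List.countP_cons]
    rcases List.mem_cons.1 ha with rfl | hat
    · rw [hPa]
      simp only [if_true]
      constructor
      · intro hle b hb hbx
        have h0 : t.countP P = 0 := by omega
        rcases List.mem_cons.1 hb with rfl | hbt
        · exact absurd rfl hbx
        · simpa using List.countP_eq_zero.1 h0 b hbt
      · intro hall
        have h0 : t.countP P = 0 := List.countP_eq_zero.2 (by
          intro b hbt
          simpa using hall b (List.mem_cons_of_mem _ hbt) (fun e => hx (e ▸ hbt)))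
        omega
    · have hxa : x ≠ a := fun e => hx (e ▸ hat)
      have hcnt : 1 ≤ t.countP P := List.countP_pos_iff.2 ⟨a, hat, hPa⟩
      have hrec := ih ht hat
      constructor
      · intro hle
        have hPx : P x = false := by
          by_cases hp : P x = true
          · rw [hp] at hle; simp only [if_true] at hle; omega
          · simpa using hp
        rw [hPx] at hle
        simp at hle
        intro b hb hbx
        rcases List.mem_cons.1 hb with rfl | hbt
        · exact hPx
        · exact (hrec.1 hle) b hbt hbx
      · intro hall
        have hPx : P x = false := hall x (List.mem_cons_self) hxa
        rw [hPx]
        simp only [Bool.false_eq_true, if_false, add_zero]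
        exact hrec.2 (fun b hbt hbx => hall b (List.mem_cons_of_mem _ hbt) hbx)

lemma findBreak_cond (nums : List Int) (i : Nat) (hi : 1 ≤ i) :
    (PySem.List.pyGetD nums (i : Int) 0 < PySem.List.pyGetD nums ((i : Int) - 1) 0) ↔ pvDB nums i = true := by
  have h1 : ((i : Int) - 1) = ((i - 1 : Nat) : Int) := by omega
  rw [h1, PySem.List.pyGetD_natCast, PySem.List.pyGetD_natCast, pvDB, decide_eq_true_iff]

lemma findBreak_spec (nums : List Int) (j : Nat) (hj : 1 ≤ j) :
    (findBreak nums j = 0 ∧ ∀ i, j ≤ i → i < nums.length → pvDB nums i = false) ∨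
    (j ≤ findBreak nums j ∧ findBreak nums j < nums.length ∧ pvDB nums (findBreak nums j) = true ∧
      ∀ i, j ≤ i → i < findBreak nums j → pvDB nums i = false) := by
  rw [findBreak]
  by_cases h : j < nums.length
  · rw [if_pos h]
    by_cases hc : PySem.List.pyGetD nums (j : Int) 0 < PySem.List.pyGetD nums ((j : Int) - 1) 0
    · rw [if_pos hc]
      exact Or.inr ⟨le_refl j, h, (findBreak_cond nums j hj).1 hc, fun i h1 h2 => by omega⟩
    · rw [if_neg hc]
      have hdb : pvDB nums j = false := by
        rcases Bool.eq_false_or_eq_true (pvDB nums j) with ht | hf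
        · exact absurd ((findBreak_cond nums j hj).2 ht) hc
        · exact hf
      rcases findBreak_spec nums (j + 1) (by omega) with ⟨h0, hall⟩ | ⟨h1, h2, h3, h4⟩
      · refine Or.inl ⟨h0, fun i hi1 hi2 => ?_⟩
        rcases Nat.eq_or_lt_of_le hi1 with rfl | hlt
        · exact hdb
        · exact hall i hlt hi2
      · refine Or.inr ⟨by omega, h2, h3, fun i hi1 hi2 => ?_⟩
        rcases Nat.eq_or_lt_of_le hi1 with rfl | hlt
        · exact hdb
        · exact h4 i hlt hi2
  · rw [if_neg h]
    exact Or.inl ⟨rfl, fun i h1 h2 => by omega⟩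
termination_by nums.length - j

lemma all_adj_eq_isChain (r : List Int) :
    ((PySem.List.pyRange 0 ((r.length : Int) - 1) 1).all
      (fun i => decide (PySem.List.pyGetD r i 0 ≤ PySem.List.pyGetD r (i + 1) 0)))
    = decide (List.IsChain (· ≤ ·) r) := by
  rw [Bool.eq_iff_iff]
  simp only [List.all_eq_true, decide_eq_true_eq, PySem.List.mem_pyRange_one,
    List.isChain_iff_getElem]
  constructor
  · intro hall i hi
    have h0 : (0 : Int) ≤ (i : Int) := by omega
    have h1 : (i : Int) < (r.length : Int) - 1 := by omega
    have := hall (i : Int) ⟨h0, h1⟩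
    rw [PySem.List.pyGetD_eq_getElem r 0 h0 (by omega),
      PySem.List.pyGetD_eq_getElem r 0 (by omega) (by omega)] at this
    have e1 : ((i : Int)).toNat = i := by omega
    have e2 : ((i : Int) + 1).toNat = i + 1 := by omega
    simpa [e1, e2] using this
  · intro hch i ⟨h0, h1⟩
    rw [PySem.List.pyGetD_eq_getElem r 0 h0 (by omega),
      PySem.List.pyGetD_eq_getElem r 0 (by omega) (by omega)]
    have e2 : (i + 1).toNat = i.toNat + 1 := by omega
    simp only [e2]
    have := hch i.toNat (by omega)
    simpa only [List.getElem_eq_getD (fallback := 0)] using this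

lemma B_char (nums : List Int) (h : 2 < nums.length) :
    check_speed_alt nums =
      decide (List.IsChain (· ≤ ·)
        (nums.drop (findBreak nums 1) ++ nums.take (findBreak nums 1))) := by
  have hguard : ¬(nums = [] ∨ nums.length ≤ 2) := by
    rintro (rfl | hle)
    · simp at h
    · omega
  simp only [check_speed_alt, if_neg hguard, PySem.List.slice_from_natCast,
    PySem.List.slice_to_natCast, all_adj_eq_isChain]

lemma A_char (nums : List Int) (h : 2 < nums.length) :
    check_speed nums =
      decide ((if nums.getD 0 0 < nums.getD (nums.length - 1) 0 then (1:Int) else 0)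
        + ((List.range (nums.length - 1)).countP (fun k => pvDB nums (k + 1)) : Int) ≤ 1) := by
  have hguard : ¬(nums = [] ∨ nums.length ≤ 2) := by
    rintro (rfl | hle)
    · simp at h
    · omega
  have hne : nums ≠ [] := by rintro rfl; simp at h
  have hn0 : (0:Int) < (nums.length : Int) := by
    have := h; omega
  simp only [check_speed, if_neg hguard]
  rw [PySem.List.pyRange_one_cons hn0, List.foldl_cons]
  rw [PySem.Int.mod_eq_emod_of_pos hn0, Int.zero_emod]
  rw [show ((0:Int) - 1) = -1 by norm_num]
  rw [PySem.List.pyGetD_zero, PySem.List.pyGetD_neg_one nums 0 hne]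
  rw [List.getLast_eq_getElem hne, ← List.getD_eq_getElem nums 0 (by omega)]
  rw [PySem.List.foldl_congr_mem _ _
    (fun c i => if (fun i => decide (PySem.List.pyGetD nums i 0 < PySem.List.pyGetD nums (i - 1) 0)) i = true then c + 1 else c) _
    (by
      intro acc x hx
      rcases PySem.List.mem_pyRange_one.1 hx with ⟨hx1, hx2⟩
      rw [PySem.Int.mod_eq_emod_of_pos hn0, Int.emod_eq_of_lt (by omega) hx2]
      simp only [decide_eq_true_eq])]
  rw [PySem.List.foldl_count_if]
  have hcnt : (PySem.List.pyRange 1 (nums.length : Int) 1).countP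
      (fun i => decide (PySem.List.pyGetD nums i 0 < PySem.List.pyGetD nums (i - 1) 0))
      = (List.range (nums.length - 1)).countP (fun k => pvDB nums (k + 1)) := by
    rw [PySem.List.pyRange_one]
    rw [show ((nums.length : Int) - 1).toNat = nums.length - 1 by omega]
    rw [List.countP_map]
    refine List.countP_congr ?_
    intro k hk
    simp only [Function.comp_apply]
    rw [show ((1:Int) + (k:Int)) = ((k+1 : Nat) : Int) by push_cast; ring]
    rw [show (((k+1 : Nat) : Int) - 1) = ((k : Nat) : Int) by push_cast; ring]
    rw [PySem.List.pyGetD_natCast, PySem.List.pyGetD_natCast]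
    simp [pvDB]
  norm_num [hcnt]

lemma pvDB_false_iff (nums : List Int) (j : Nat) :
    pvDB nums j = false ↔ nums.getD (j - 1) 0 ≤ nums.getD j 0 := by
  simp [pvDB, not_lt]

lemma isChain_take (nums : List Int) (p : Nat)
    (hpre : ∀ i, 1 ≤ i → i < p → pvDB nums i = false) :
    List.IsChain (· ≤ ·) (nums.take p) := by
  rw [List.isChain_iff_getElem]
  intro i hi
  have hlen : (nums.take p).length ≤ p := by simp
  have hlen2 : (nums.take p).length ≤ nums.length := by simp
  have hdb := (pvDB_false_iff nums (i + 1)).1 (hpre (i + 1) (by omega) (by omega))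
  rw [List.getElem_take, List.getElem_take]
  rw [List.getD_eq_getElem nums 0 (by omega), List.getD_eq_getElem nums 0 (by omega)] at hdb
  simpa using hdb

lemma isChain_drop_iff (nums : List Int) (p : Nat) :
    List.IsChain (· ≤ ·) (nums.drop p) ↔
      ∀ j, p < j → j < nums.length → pvDB nums j = false := by
  rw [List.isChain_iff_getElem]
  constructor
  · intro hch j hj1 hj2
    have hi : (j - p - 1) + 1 < (nums.drop p).length := by simp; omega
    have := hch (j - p - 1) hi
    rw [List.getElem_drop, List.getElem_drop] at this
    rw [pvDB_false_iff]
    rw [List.getD_eq_getElem nums 0 (by omega), List.getD_eq_getElem nums 0 (by omega)]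
    have e1 : p + (j - p - 1) = j - 1 := by omega
    have e2 : p + (j - p - 1 + 1) = j := by omega
    simp only [e1, e2] at this
    exact this
  · intro hall i hi
    have hlen : (nums.drop p).length = nums.length - p := by simp
    have hdb := (pvDB_false_iff nums (p + i + 1)).1 (hall (p + i + 1) (by omega) (by omega))
    have e1 : p + i + 1 - 1 = p + i := by omega
    rw [e1] at hdb
    rw [List.getD_eq_getElem nums 0 (by omega), List.getD_eq_getElem nums 0 (by omega)] at hdb
    rw [List.getElem_drop, List.getElem_drop]
    exact hdb

lemma core (nums : List Int) (h : 2 < nums.length) :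
    ((if nums.getD 0 0 < nums.getD (nums.length - 1) 0 then (1:Int) else 0)
        + ((List.range (nums.length - 1)).countP (fun k => pvDB nums (k + 1)) : Int) ≤ 1)
    ↔ List.IsChain (· ≤ ·)
        (nums.drop (findBreak nums 1) ++ nums.take (findBreak nums 1)) := by
  rcases findBreak_spec nums 1 (le_refl 1) with ⟨hp0, hall⟩ | ⟨hp1, hpn, hpd, hpre⟩
  · -- no internal descent: both sides true
    rw [hp0]
    have hcnt : (List.range (nums.length - 1)).countP (fun k => pvDB nums (k + 1)) = 0 :=
      List.countP_eq_zero.2 (by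
        intro k hk
        have hk' : k < nums.length - 1 := List.mem_range.1 hk
        simpa using hall (k + 1) (by omega) (by omega))
    refine iff_of_true (by rw [hcnt]; split <;> norm_num) ?_
    simp only [List.drop_zero, List.take_zero, List.append_nil]
    rw [List.isChain_iff_getElem]
    intro i hi
    have hdb := (pvDB_false_iff nums (i + 1)).1 (hall (i + 1) (by omega) (by omega))
    rw [List.getD_eq_getElem nums 0 (by omega), List.getD_eq_getElem nums 0 (by omega)] at hdb
    simpa using hdb
  · set p := findBreak nums 1 with hp
    have hmem : p - 1 ∈ List.range (nums.length - 1) := List.mem_range.2 (by omega)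
    have hPa : (fun k => pvDB nums (k + 1)) (p - 1) = true := by
      simpa [show p - 1 + 1 = p by omega] using hpd
    have hjunc_last : (nums.drop p).getLast? = some (nums.getD (nums.length - 1) 0) := by
      rw [List.getLast?_drop, if_neg (by omega)]
      have hne : nums ≠ [] := by rintro rfl; simp at h
      rw [List.getLast?_eq_some_getLast hne, List.getLast_eq_getElem hne,
        ← List.getD_eq_getElem nums 0 (by omega)]
    have hjunc_head : (nums.take p).head? = some (nums.getD 0 0) := by
      rw [List.head?_take, if_neg (by omega)]
      have hne : nums ≠ [] := by rintro rfl; simp at h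
      rw [List.head?_eq_some_head hne, List.head_eq_getElem hne, ← List.getD_eq_getElem nums 0 (by omega)]
    by_cases hW : nums.getD 0 0 < nums.getD (nums.length - 1) 0
    · -- wrap descent present together with an internal one: both sides false
      refine iff_of_false ?_ ?_
      · rw [if_pos hW]
        have : 0 < (List.range (nums.length - 1)).countP (fun k => pvDB nums (k + 1)) :=
          List.countP_pos_iff.2 ⟨p - 1, hmem, hPa⟩
        omega
      · rw [List.isChain_append]
        rintro ⟨-, -, hj⟩
        have h2 := hj (nums.getD (nums.length - 1) 0) (by rw [hjunc_last]; simp)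
          (nums.getD 0 0) (by rw [hjunc_head]; simp)
        omega
    · -- no wrap descent: sortedness of the rotation ↔ p is the only internal descent
      rw [if_neg hW]
      have hcast : ((if True then (0:Int) else 0) : Int) = 0 := by simp
      rw [List.isChain_append]
      have hcnt_iff := countP_unique (P := fun k => pvDB nums (k + 1)) (List.nodup_range) hmem hPa
      constructor
      · intro hle
        have hle' : (List.range (nums.length - 1)).countP (fun k => pvDB nums (k + 1)) ≤ 1 := by
          omega
        refine ⟨?_, isChain_take nums p hpre, ?_⟩
        · rw [isChain_drop_iff]
          intro j hj1 hj2
          have := hcnt_iff.1 hle' (j - 1) (List.mem_range.2 (by omega)) (by omega)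
          simpa [show j - 1 + 1 = j by omega] using this
        · intro x hx y hy
          rw [hjunc_last] at hx
          rw [hjunc_head] at hy
          simp only [Option.mem_some_iff] at hx hy
          subst hx; subst hy
          omega
      · rintro ⟨hdropch, -, -⟩
        rw [isChain_drop_iff] at hdropch
        have hcnt1 : (List.range (nums.length - 1)).countP (fun k => pvDB nums (k + 1)) ≤ 1 := by
          refine hcnt_iff.2 ?_
          intro b hb hbne
          have hb' : b < nums.length - 1 := List.mem_range.1 hb
          rcases Nat.lt_or_ge (b + 1) p with hlt | hge
          · exact hpre (b + 1) (by omega) hlt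
          · exact hdropch (b + 1) (by omega) (by omega)
        omega

-- ===== VERDICT (by name: the statement is the Claim_ definition above) =====
theorem check_speed_spec : Claim_equal_check_speed := by
  intro nums _dom
  unfold Spec_check_speed
  by_cases h : 2 < nums.length
  · rw [A_char nums h, B_char nums h, decide_eq_decide]
    exact core nums h
  · have hg : nums = [] ∨ nums.length ≤ 2 := by
      right; omega
    simp [check_speed, check_speed_alt, hg]
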